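-- pv_equiv track=rewrite | github.com/an09mous/OCRT | prep.py | _truncate_label
-- ===== SOURCE A (Python) =====
-- def _truncate_label(text: str, max_text_len: int) -> str:
--     cost = 0
--     for i in range(len(text)):
--         if i != 0 and text[i] == text[i - 1]:
--             cost += 2
--         else:
--             cost += 1
--         if cost > max_text_len:
--             return text[:i]
--     return text
-- ===== SOURCE B (Python) =====
-- def _truncate_label(text: str, max_text_len: int) -> str:
--     # Prefix-cost table + binary search for the cut point (instead of an
--     # early-exit scan): costs are positive so the cumulative table is strictly
--     # increasing and bisect_right semantics give the first index whose
--     # cumulative cost exceeds the budget.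
--     cum = []
--     total = 0
--     prev = None
--     for ch in text:
--         total += 2 if ch == prev else 1
--         cum.append(total)
--         prev = ch
--     lo, hi = 0, len(cum)
--     while lo < hi:
--         mid = (lo + hi) // 2
--         if cum[mid] <= max_text_len:
--             lo = mid + 1
--         else:
--             hi = mid
--     return text[:lo]
-- ===== Notes on version B (the rewrite author's own statement) =====
-- stated objective: alternative
-- what changed: Replaced the early-exit cost scan with a strictly-increasing prefix-cost table plus a binary search (bisect_right by hand) for the first index whose cumulative cost exceeds the budget.
import Mathlib
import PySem

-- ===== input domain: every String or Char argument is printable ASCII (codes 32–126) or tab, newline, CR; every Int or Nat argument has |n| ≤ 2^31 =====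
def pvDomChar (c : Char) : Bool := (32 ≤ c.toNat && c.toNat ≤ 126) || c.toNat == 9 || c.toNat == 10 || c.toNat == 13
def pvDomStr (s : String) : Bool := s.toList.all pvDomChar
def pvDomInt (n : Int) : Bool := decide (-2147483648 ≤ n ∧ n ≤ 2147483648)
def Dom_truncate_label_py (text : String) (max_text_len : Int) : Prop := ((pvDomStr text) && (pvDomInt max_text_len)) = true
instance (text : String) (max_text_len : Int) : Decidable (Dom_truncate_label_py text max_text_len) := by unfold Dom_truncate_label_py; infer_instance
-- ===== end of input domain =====

-- B replaces A's early-exit cost scan by a strictly increasing prefix-cost table plus a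
-- hand-written binary search (bisect_right) for the cut point; same O(n) cost, alternative structure.

-- ===== PORT A =====
-- A's for-loop over range(len(text)) with early return; indexing text[i]/text[i-1] is
-- always in range here, so List.getD with a dummy default is exact.
def pvALoop (lc : List Char) (m : Int) : List Nat → Int → Option Nat
  | [], _ => none
  | i :: rest, cost =>
    let cost := cost + (if i ≠ 0 ∧ lc.getD i ' ' = lc.getD (i - 1) ' ' then 2 else 1)
    if m < cost then some i else pvALoop lc m rest cost

def truncate_label_py (text : String) (max_text_len : Int) : String :=
  match pvALoop text.toList max_text_len (List.range text.toList.length) 0 with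
  | some i => PySem.Str.slice text none (some (i : Int))   -- text[:i]
  | none => text

-- ===== PORT B =====
-- the cum-building loop of Source B (total/prev accumulators, in order)
def pvCum : List Char → Int → Option Char → List Int
  | [], _, _ => []
  | ch :: rest, total, prev =>
    let total := total + (if some ch = prev then 2 else 1)
    total :: pvCum rest total (some ch)

-- the hand-written bisect_right while-loop of Source B; cum[mid] is always in range,
-- so List.getD with a dummy default is exact.
def pvBS (cum : List Int) (m : Int) (lo hi : Nat) : Nat :=
  if _h : lo < hi then
    if cum.getD ((lo + hi) / 2) 0 ≤ m then pvBS cum m ((lo + hi) / 2 + 1) hi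
    else pvBS cum m lo ((lo + hi) / 2)
  else lo
termination_by hi - lo
decreasing_by all_goals omega

def truncate_label_py_alt (text : String) (max_text_len : Int) : String :=
  let cum := pvCum text.toList 0 none
  let lo := pvBS cum max_text_len 0 cum.length
  PySem.Str.slice text none (some (lo : Int))   -- text[:lo]

-- ===== PRECONDITION & SPEC =====
def Spec_truncate_label_py (text : String) (max_text_len : Int) (out : String) : Prop := out = truncate_label_py_alt text max_text_len
instance (text : String) (max_text_len : Int) (out : String) : Decidable (Spec_truncate_label_py text max_text_len out) := by unfold Spec_truncate_label_py; infer_instance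

-- ===== CLAIM (what is proved, stated in full; the proofs are below) =====
def Claim_equal_truncate_label_py : Prop := ∀ (text : String) (max_text_len : Int), Dom_truncate_label_py text max_text_len → Spec_truncate_label_py text max_text_len (truncate_label_py text max_text_len)

-- ===== LEMMAS AND PROOFS =====

-- r is the first index whose cumulative cost exceeds m (or the length if none does)
def pvGood (C : List Int) (m : Int) (r : Nat) : Prop :=
  r ≤ C.length ∧ (∀ i < r, C.getD i 0 ≤ m) ∧ (r < C.length → m < C.getD r 0)

theorem pvGood_unique {C : List Int} {m : Int} {r1 r2 : Nat}
    (h1 : pvGood C m r1) (h2 : pvGood C m r2) : r1 = r2 := by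
  obtain ⟨l1, a1, b1⟩ := h1
  obtain ⟨l2, a2, b2⟩ := h2
  by_contra hne
  rcases Nat.lt_or_ge r1 r2 with h | h
  · exact absurd (a2 r1 h) (not_le.mpr (b1 (lt_of_lt_of_le h l2)))
  · have h' : r2 < r1 := lt_of_le_of_ne h (fun e => hne e.symm)
    exact absurd (a1 r2 h') (not_le.mpr (b2 (lt_of_lt_of_le h' l1)))

theorem pvCum_length (lc : List Char) (t : Int) (p : Option Char) :
    (pvCum lc t p).length = lc.length := by
  induction lc generalizing t p with
  | nil => rfl
  | cons c rest ih => simp [pvCum, ih]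

theorem pvCum_lt (lc : List Char) (t : Int) (p : Option Char) :
    ∀ x ∈ pvCum lc t p, t < x := by
  induction lc generalizing t p with
  | nil => simp [pvCum]
  | cons c rest ih =>
    intro x hx
    simp only [pvCum, List.mem_cons] at hx
    rcases hx with rfl | hx
    · split <;> omega
    · have := ih _ _ x hx
      split at this <;> omega

theorem pvCum_pairwise (lc : List Char) (t : Int) (p : Option Char) :
    (pvCum lc t p).Pairwise (· < ·) := by
  induction lc generalizing t p with
  | nil => simp [pvCum]
  | cons c rest ih =>
    simp only [pvCum, List.pairwise_cons]
    exact ⟨fun x hx => pvCum_lt _ _ _ x hx, ih _ _⟩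

theorem pvCum_mono (lc : List Char) (t : Int) (p : Option Char)
    {i j : Nat} (hij : i ≤ j) (hj : j < (pvCum lc t p).length) :
    (pvCum lc t p).getD i 0 ≤ (pvCum lc t p).getD j 0 := by
  rcases Nat.eq_or_lt_of_le hij with rfl | hlt
  · exact le_refl _
  · have hi : i < (pvCum lc t p).length := lt_trans hlt hj
    rw [List.getD_eq_getElem _ _ hi, List.getD_eq_getElem _ _ hj]
    exact le_of_lt ((List.pairwise_iff_getElem.mp (pvCum_pairwise lc t p)) i j hi hj hlt)

theorem pvBS_good (C : List Int) (m : Int)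
    (mono : ∀ i j, i ≤ j → j < C.length → C.getD i 0 ≤ C.getD j 0) :
    ∀ k lo hi, hi - lo ≤ k → lo ≤ hi → hi ≤ C.length →
      (∀ i < lo, C.getD i 0 ≤ m) → (∀ i, hi ≤ i → i < C.length → m < C.getD i 0) →
      pvGood C m (pvBS C m lo hi) := by
  intro k
  induction k with
  | zero =>
    intro lo hi hk hle hhi hlow hhigh
    have : lo = hi := by omega
    subst this
    rw [pvBS]
    simp only [lt_irrefl, dite_false]
    exact ⟨hhi, hlow, fun h => hhigh lo (le_refl _) h⟩
  | succ k ih =>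
    intro lo hi hk hle hhi hlow hhigh
    rw [pvBS]
    split
    · next h =>
      split
      · next hmid =>
        refine ih ((lo + hi) / 2 + 1) hi (by omega) (by omega) hhi ?_ hhigh
        intro i hi'
        rcases Nat.lt_or_ge i lo with h' | h'
        · exact hlow i h'
        · exact le_trans (mono i ((lo + hi) / 2) (by omega) (by omega)) hmid
      · next hmid =>
        refine ih lo ((lo + hi) / 2) (by omega) (by omega) (by omega) hlow ?_
        intro i hge hlen
        have : m < C.getD ((lo + hi) / 2) 0 := lt_of_not_ge hmid
        exact lt_of_lt_of_le this (mono _ i hge hlen)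
    · next h =>
      have : lo = hi := by omega
      subst this
      exact ⟨hhi, hlow, fun h' => hhigh lo (le_refl _) h'⟩

-- cost of text[0..s-1] in A's accounting, expressed via B's table
def pvCostAt (lc : List Char) (s : Nat) : Int :=
  if s = 0 then 0 else (pvCum lc 0 none).getD (s - 1) 0

theorem pvCum_step (lc : List Char) (t : Int) (p : Option Char) :
    ∀ i, i + 1 < lc.length →
      (pvCum lc t p).getD (i + 1) 0 =
        (pvCum lc t p).getD i 0 + (if lc.getD (i + 1) ' ' = lc.getD i ' ' then 2 else 1) := by
  induction lc generalizing t p with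
  | nil => intro i h; simp at h
  | cons c rest ih =>
    intro i h
    cases i with
    | zero =>
      cases rest with
      | nil => simp at h
      | cons c2 r2 =>
        simp [pvCum]
    | succ j =>
      simp only [pvCum, List.getD_cons_succ]
      exact ih _ _ j (by simpa using h)

theorem pvCostAt_step (lc : List Char) (s : Nat) (hs : s < lc.length) :
    pvCostAt lc s + (if s ≠ 0 ∧ lc.getD s ' ' = lc.getD (s - 1) ' ' then 2 else 1)
      = (pvCum lc 0 none).getD s 0 := by
  cases s with
  | zero =>
    cases lc with
    | nil => simp at hs
    | cons c rest =>
      simp [pvCostAt, pvCum]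
  | succ j =>
    have := pvCum_step lc 0 none j hs
    simp only [pvCostAt, Nat.succ_ne_zero, if_false, Nat.add_sub_cancel]
    rw [this]
    simp

theorem pvALoop_good (lc : List Char) (m : Int) :
    ∀ k s, s + k = lc.length → (∀ i < s, (pvCum lc 0 none).getD i 0 ≤ m) →
      pvGood (pvCum lc 0 none) m
        ((pvALoop lc m (List.range' s k) (pvCostAt lc s)).getD lc.length) := by
  intro k
  induction k with
  | zero =>
    intro s hs hlow
    simp only [List.range', pvALoop, Option.getD_none]
    refine ⟨by rw [pvCum_length], fun i hi => hlow i (by omega), fun h => ?_⟩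
    rw [pvCum_length] at h; omega
  | succ k ih =>
    intro s hs hlow
    have hslen : s < lc.length := by omega
    simp only [List.range', pvALoop]
    rw [pvCostAt_step lc s hslen]
    split
    · next h =>
      simp only [Option.getD_some]
      refine ⟨by rw [pvCum_length]; omega, fun i hi => hlow i hi, fun _ => h⟩
    · next h =>
      have hcost : (pvCum lc 0 none).getD s 0 = pvCostAt lc (s + 1) := by
        simp [pvCostAt]
      rw [hcost]
      refine ih (s + 1) (by omega) ?_
      intro i hi
      rcases Nat.lt_or_ge i s with h' | h'
      · exact hlow i h'
      · have : i = s := by omega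
        subst this
        exact le_of_not_gt (by simpa [pvCostAt] using h)

theorem pvResult_eq (text : String) (m : Int) :
    (pvALoop text.toList m (List.range text.toList.length) 0).getD text.toList.length
      = pvBS (pvCum text.toList 0 none) m 0 (pvCum text.toList 0 none).length := by
  have hA : pvGood (pvCum text.toList 0 none) m
      ((pvALoop text.toList m (List.range text.toList.length) 0).getD text.toList.length) := by
    have := pvALoop_good text.toList m text.toList.length 0 (by omega) (by omega)
    simpa [List.range_eq_range', pvCostAt] using this
  have hB : pvGood (pvCum text.toList 0 none) m
      (pvBS (pvCum text.toList 0 none) m 0 (pvCum text.toList 0 none).length) := by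
    refine pvBS_good _ m (fun i j hij hj => pvCum_mono _ _ _ hij hj)
      (pvCum text.toList 0 none).length 0 _ (by omega) (by omega) (le_refl _)
      (by omega) (by omega)
  exact pvGood_unique hA hB

-- ===== VERDICT (by name: the statement is the Claim_ definition above) =====
theorem truncate_label_py_spec : Claim_equal_truncate_label_py := by
  intro text m _
  unfold Spec_truncate_label_py truncate_label_py truncate_label_py_alt
  have hres := pvResult_eq text m
  cases hA : pvALoop text.toList m (List.range text.toList.length) 0 with
  | some i =>
    rw [hA] at hres
    simp only [Option.getD_some] at hres
    simp [← hres]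
  | none =>
    rw [hA] at hres
    simp only [Option.getD_none] at hres
    simp [← hres, PySem.Str.slice]
    conv_rhs => rw [← String.length_toList, List.take_length]
    simp
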